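-- pv_equiv track=rewrite | github.com/fatb4f/mesh | scripts/derive_openapi.py | component_name
-- ===== SOURCE A (Python) =====
-- def component_name(file_name: str) -> str:
--     stem = file_name
--     if stem.endswith(".schema.json"):
--         stem = stem[: -len(".schema.json")]
--     out = []
--     upper_next = True
--     for ch in stem:
--         if ch.isalnum():
--             out.append(ch.upper() if upper_next else ch)
--             upper_next = False
--             continue
--         upper_next = True
--     return "".join(out) or "Schema"
-- ===== SOURCE B (Python) =====
-- def component_name(file_name: str) -> str:
--     stem = file_name[: -len(".schema.json")] if file_name.endswith(".schema.json") else file_name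
--     words = "".join(ch if ch.isalnum() else " " for ch in stem).split()
--     return "".join(w[0].upper() + w[1:] for w in words) or "Schema"
-- ===== Notes on version B (the rewrite author's own statement) =====
-- stated objective: idiomatic
-- what changed: Replaces A's single-pass character loop with an upper_next flag by a pipeline: map non-alphanumeric characters to spaces, split() into words, capitalize each word's first character, and join.
import Mathlib
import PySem

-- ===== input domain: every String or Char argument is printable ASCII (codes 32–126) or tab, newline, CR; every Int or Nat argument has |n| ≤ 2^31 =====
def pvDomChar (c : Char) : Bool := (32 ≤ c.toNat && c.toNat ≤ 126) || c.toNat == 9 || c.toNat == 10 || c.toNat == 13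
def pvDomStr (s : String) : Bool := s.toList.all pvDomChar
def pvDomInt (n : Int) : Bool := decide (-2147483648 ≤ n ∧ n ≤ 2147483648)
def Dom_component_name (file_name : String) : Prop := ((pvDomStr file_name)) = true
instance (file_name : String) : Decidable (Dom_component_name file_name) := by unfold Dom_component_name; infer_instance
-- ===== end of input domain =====

-- B replaces A's char-by-char flag loop by: map non-alnum chars to spaces, split() into words,
-- capitalize each word's first char, join — a different decomposition (objective: idiomatic).


-- ===== PORT A =====
def component_name (file_name : String) : String :=
  let stem : String :=
    if PySem.Str.endswith file_name ".schema.json" then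
      String.ofList (PySem.List.slice file_name.toList none (some (-12)))
    else file_name
  let st : List Char × Bool :=
    stem.toList.foldl (fun (st : List Char × Bool) ch =>
      if PySem.Chars.isalnum ch then
        (st.1 ++ [if st.2 then PySem.Chars.upperChar ch else ch], false)
      else (st.1, true)) ([], true)
  if st.1.isEmpty then "Schema" else String.ofList st.1

-- ===== PORT B =====
-- w[0].upper() + w[1:]; the [] case is unreachable (split₀ yields nonempty words)
def pvCapWord (w : List Char) : List Char :=
  match w with
  | [] => []
  | c :: rest => PySem.Chars.upper [c] ++ rest

def component_name_alt (file_name : String) : String :=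
  let stem : String :=
    if PySem.Str.endswith file_name ".schema.json" then
      String.ofList (PySem.List.slice file_name.toList none (some (-12)))
    else file_name
  let words : List (List Char) :=
    PySem.Chars.split₀ (stem.toList.map (fun ch => if PySem.Chars.isalnum ch then ch else ' '))
  let res : List Char := PySem.Chars.join [] (words.map pvCapWord)
  if res.isEmpty then "Schema" else String.ofList res

-- ===== PRECONDITION & SPEC =====
def Spec_component_name (file_name : String) (out : String) : Prop := out = component_name_alt file_name
instance (file_name : String) (out : String) : Decidable (Spec_component_name file_name out) := by unfold Spec_component_name; infer_instance

-- ===== CLAIM (what is proved, stated in full; the proofs are below) =====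
def Claim_equal_component_name : Prop := ∀ (file_name : String), Dom_component_name file_name → Spec_component_name file_name (component_name file_name)

-- ===== LEMMAS AND PROOFS =====

-- A's loop as a structural recursion
def pvAGo : List Char → Bool → List Char
  | [], _ => []
  | c :: cs, b =>
    if PySem.Chars.isalnum c then (if b then PySem.Chars.upperChar c else c) :: pvAGo cs false
    else pvAGo cs true

theorem pvFoldl_eq_aGo (cs : List Char) (acc : List Char) (b : Bool) :
    (cs.foldl (fun (st : List Char × Bool) ch =>
      if PySem.Chars.isalnum ch then
        (st.1 ++ [if st.2 then PySem.Chars.upperChar ch else ch], false)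
      else (st.1, true)) (acc, b)).1 = acc ++ pvAGo cs b := by
  induction cs generalizing acc b with
  | nil => simp [pvAGo]
  | cons c cs ih =>
    by_cases h : PySem.Chars.isalnum c
    · simp [pvAGo, h, List.foldl_cons, ih]
    · simp [pvAGo, h, List.foldl_cons, ih]

-- accumulator-free reformulation of PySem.Chars.split₀.go
def pvSplitAux : List Char → List Char → List (List Char)
  | [], cur => if cur.isEmpty then [] else [cur.reverse]
  | c :: rest, cur =>
    if PySem.Chars.isspace c then
      if cur.isEmpty then pvSplitAux rest [] else cur.reverse :: pvSplitAux rest []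
    else pvSplitAux rest (c :: cur)

theorem pvSplitGo_eq (s : List Char) (cur : List Char) (acc : List (List Char)) :
    PySem.Chars.split₀.go s cur acc = acc.reverse ++ pvSplitAux s cur := by
  induction s generalizing cur acc with
  | nil =>
    by_cases h : cur.isEmpty <;> simp [PySem.Chars.split₀.go, pvSplitAux, h]
  | cons c rest ih =>
    by_cases hs : PySem.Chars.isspace c
    · by_cases hc : cur.isEmpty <;> simp [PySem.Chars.split₀.go, pvSplitAux, hs, hc, ih]
    · simp [PySem.Chars.split₀.go, pvSplitAux, hs, ih]

theorem pvJoin_nil (ws : List (List Char)) : PySem.Chars.join [] ws = ws.flatten := by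
  induction ws with
  | nil => simp [PySem.Chars.join, List.intercalate]
  | cons w ws ih =>
    simp [PySem.Chars.join, List.intercalate] at *
    cases ws <;> simp_all [List.intersperse]

theorem pvAlnum_not_space (c : Char) (h : PySem.Chars.isalnum c = true) :
    PySem.Chars.isspace c = false := by
  simp only [PySem.Chars.isalnum, PySem.Chars.isalpha, PySem.Chars.isdigit, PySem.Chars.isspace,
    PySem.Chars.islower, PySem.Chars.isupper, Bool.or_eq_true, Bool.and_eq_true, decide_eq_true_eq,
    Bool.or_eq_false_iff, Bool.and_eq_false_iff, decide_eq_false_iff_not, Char.le_def,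
    UInt32.le_iff_toNat_le, Char.toNat] at *
  have hA : ('A').val.toNat = 65 := rfl
  have hZ : ('Z').val.toNat = 90 := rfl
  have ha : ('a').val.toNat = 97 := rfl
  have hz : ('z').val.toNat = 122 := rfl
  have h0 : ('0').val.toNat = 48 := rfl
  have h9 : ('9').val.toNat = 57 := rfl
  omega

theorem pvCapWord_append (w t : List Char) (h : w ≠ []) :
    pvCapWord (w ++ t) = pvCapWord w ++ t := by
  cases w with
  | nil => exact absurd rfl h
  | cons c rest => simp [pvCapWord]

-- the joint induction: B's split-and-capitalize equals A's flag loop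
theorem pvMain (cs : List Char) :
    (((pvSplitAux (cs.map (fun ch => if PySem.Chars.isalnum ch then ch else ' ')) []).map pvCapWord).flatten
        = pvAGo cs true)
    ∧ ∀ cur : List Char, cur ≠ [] →
      (((pvSplitAux (cs.map (fun ch => if PySem.Chars.isalnum ch then ch else ' ')) cur).map pvCapWord).flatten
        = pvCapWord cur.reverse ++ pvAGo cs false) := by
  induction cs with
  | nil =>
    refine ⟨by simp [pvSplitAux, pvAGo], ?_⟩
    intro cur hcur
    simp [pvSplitAux, List.isEmpty_iff, hcur, pvAGo]
  | cons c rest ih =>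
    obtain ⟨ihT, ihF⟩ := ih
    by_cases h : PySem.Chars.isalnum c
    · have hns := pvAlnum_not_space c h
      constructor
      · have := ihF [c] (by simp)
        simp [h, pvSplitAux, hns, pvAGo] at this ⊢
        simpa [pvCapWord, PySem.Chars.upper] using this
      · intro cur hcur
        have := ihF (c :: cur) (by simp)
        simp [h, pvSplitAux, hns, pvAGo] at this ⊢
        rw [this, pvCapWord_append cur.reverse [c] (by simpa using hcur)]
        simp
    · have hsp : PySem.Chars.isspace ' ' = true := rfl
      constructor
      · simpa [h, pvSplitAux, hsp, pvAGo] using ihT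
      · intro cur hcur
        simp [h, pvSplitAux, hsp, List.isEmpty_iff, hcur, pvAGo]
        exact ihT

-- ===== VERDICT (by name: the statement is the Claim_ definition above) =====
theorem component_name_spec : Claim_equal_component_name := by
  intro file_name _
  unfold Spec_component_name component_name component_name_alt
  simp only
  rw [PySem.Chars.split₀]
  rw [pvSplitGo_eq, pvJoin_nil]
  simp only [List.reverse_nil, List.nil_append]
  rw [pvFoldl_eq_aGo, (pvMain _).1]
  simp
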